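-- pv_equiv track=rewrite | github.com/doronrpa-hub/rpa-port-platform | functions/lib/identity_graph.py | _iso6346_check_digit
-- ===== SOURCE A (Python) =====
-- def _iso6346_check_digit(prefix_digits):
--     """Validate ISO 6346 container check digit."""
--     alphabet = "0123456789A BCDEFGHIJK LMNOPQRSTU VWXYZ"
--     values = {}
--     n = 0
--     for c in alphabet:
--         if c == ' ':
--             n += 1
--             continue
--         values[c] = n
--         n += 1
--     total = 0
--     for i, ch in enumerate(prefix_digits[:10]):
--         total += values.get(ch, 0) * (2 ** i)
--     check = total % 11
--     if check == 10:
--         check = 0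
--     return str(check) == prefix_digits[10]
-- ===== SOURCE B (Python) =====
-- def _iso6346_check_digit(prefix_digits):
--     """Validate ISO 6346 container check digit."""
--     ALPHABET = "0123456789ABCDEFGHIJKLMNOPQRSTUVWXYZ"
--     acc = 0
--     for ch in reversed(prefix_digits[:10]):
--         i = ALPHABET.find(ch)
--         acc = (2 * acc + max(0, i + (i - 1) // 10)) % 11
--     if acc == 10:
--         acc = 0
--     return prefix_digits[10] == str(acc)
-- ===== Notes on version B (the rewrite author's own statement) =====
-- stated objective: alternative
-- what changed: Replaces A's dict-building pass plus forward weighted sum with a single backwards Horner evaluation (acc = 2*acc + value, reduced mod 11 at every step, so no powers of two and no final large total), with the character value obtained as max(0, i + (i-1)//11-skip) from the index in an unpadded alphabet.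
import Mathlib
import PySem

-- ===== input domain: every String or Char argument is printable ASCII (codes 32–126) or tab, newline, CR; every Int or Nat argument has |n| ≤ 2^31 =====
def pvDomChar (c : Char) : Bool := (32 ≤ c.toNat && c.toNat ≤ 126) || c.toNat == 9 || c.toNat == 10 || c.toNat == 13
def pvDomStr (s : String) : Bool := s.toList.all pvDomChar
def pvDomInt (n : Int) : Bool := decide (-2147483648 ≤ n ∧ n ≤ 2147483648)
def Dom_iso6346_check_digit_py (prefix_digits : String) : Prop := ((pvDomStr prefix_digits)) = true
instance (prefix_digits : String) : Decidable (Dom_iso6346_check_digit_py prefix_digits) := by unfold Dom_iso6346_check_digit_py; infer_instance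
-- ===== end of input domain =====

-- B replaces A's dict-building pass + forward weighted sum by a backwards Horner evaluation reduced mod 11 at each step (alternative; same cost).

-- ===== PORT A =====
-- A's first loop: build the value dict from the space-padded alphabet.
def isoValues : PySem.Dict Char Int :=
  (("0123456789A BCDEFGHIJK LMNOPQRSTU VWXYZ").toList.foldl
    (fun (st : PySem.Dict Char Int × Int) c =>
      if c = ' ' then (st.1, st.2 + 1) else (st.1.insert c st.2, st.2 + 1))
    (PySem.Dict.empty, 0)).1

def iso6346_check_digit_py (prefix_digits : String) : Bool :=
  let total :=
    (PySem.List.enumerate (PySem.List.slice prefix_digits.toList none (some 10)) 0).foldl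
      (fun acc (p : Int × Char) => acc + (isoValues.getD p.2 0) * (2 : Int) ^ p.1.toNat) 0
  let check := PySem.Int.mod total 11
  let check := if check = 10 then (0 : Int) else check
  (PySem.Int.toStr check).toList == [PySem.List.pyGetD prefix_digits.toList 10 ' ']

-- ===== PORT B =====
-- ALPHABET.find(ch): first index of the single character ch, or -1 (PySem.Str.find on a one-char needle)
def altFind (ch : Char) : Int :=
  PySem.Str.find "0123456789ABCDEFGHIJKLMNOPQRSTUVWXYZ" (String.ofList [ch])

def iso6346_check_digit_py_alt (prefix_digits : String) : Bool :=
  let acc :=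
    (PySem.List.slice prefix_digits.toList none (some 10)).reverse.foldl
      (fun a ch =>
        let i := altFind ch
        PySem.Int.mod (2 * a + max 0 (i + PySem.Int.floordiv (i - 1) 10)) 11) 0
  let acc := if acc = 10 then (0 : Int) else acc
  [PySem.List.pyGetD prefix_digits.toList 10 ' '] == (PySem.Int.toStr acc).toList

-- ===== PRECONDITION & SPEC =====
-- A raises IndexError (prefix_digits[10]) on strings shorter than 11 characters; those are excluded.
def Pre_iso6346_check_digit_py (prefix_digits : String) : Prop :=
  11 ≤ prefix_digits.toList.length
instance (prefix_digits : String) : Decidable (Pre_iso6346_check_digit_py prefix_digits) := by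
  unfold Pre_iso6346_check_digit_py; infer_instance

def pvWitness_iso6346_check_digit_py : String := "CSQU3054383"

def Spec_iso6346_check_digit_py (prefix_digits : String) (out : Bool) : Prop :=
  out = iso6346_check_digit_py_alt prefix_digits
instance (prefix_digits : String) (out : Bool) : Decidable (Spec_iso6346_check_digit_py prefix_digits out) := by
  unfold Spec_iso6346_check_digit_py; infer_instance

-- ===== CLAIM =====
def Claim_equal_iso6346_check_digit_py : Prop := ∀ (prefix_digits : String), Dom_iso6346_check_digit_py prefix_digits → Pre_iso6346_check_digit_py prefix_digits → Spec_iso6346_check_digit_py prefix_digits (iso6346_check_digit_py prefix_digits)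

-- ===== LEMMAS AND PROOFS =====

-- B's per-character value (before reduction): A's table value
def bVal (ch : Char) : Int :=
  max 0 (altFind ch + PySem.Int.floordiv (altFind ch - 1) 10)

set_option maxRecDepth 8192 in
theorem val_eq_ofNat : ∀ n ∈ List.range 128, isoValues.getD (Char.ofNat n) 0 = bVal (Char.ofNat n) := by
  decide

theorem val_eq (c : Char) (h : pvDomChar c = true) : isoValues.getD c 0 = bVal c := by
  have hn : c.toNat < 128 := by simp [pvDomChar] at h; omega
  simpa [Char.ofNat_toNat] using val_eq_ofNat c.toNat (List.mem_range.mpr hn)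

-- exact weighted sum of A, as a structural recursion
def wsum : List Char → Int
  | [] => 0
  | x :: xs => isoValues.getD x 0 + 2 * wsum xs

-- A's enumerate-foldl equals acc + 2^k * wsum
theorem totalA_eq (xs : List Char) : ∀ (k : Nat) (acc : Int),
    (PySem.List.enumerate xs (k : Int)).foldl
      (fun acc (p : Int × Char) => acc + (isoValues.getD p.2 0) * (2 : Int) ^ p.1.toNat) acc
    = acc + 2 ^ k * wsum xs := by
  induction xs with
  | nil => intro k acc; simp [PySem.List.enumerate, wsum]
  | cons x xs ih =>
    intro k acc
    rw [PySem.List.enumerate_cons]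
    have hcast : (k : Int) + 1 = ((k + 1 : Nat) : Int) := by push_cast; ring
    simp only [List.foldl_cons, hcast]
    rw [ih (k + 1)]
    simp only [wsum, Int.toNat_natCast, pow_succ]
    ring

-- B's stepwise-mod Horner foldl over the reversed list equals (a * 2^len + wsum) % 11, given 0 ≤ a < 11
theorem hornerB_eq (xs : List Char) (h : xs.all pvDomChar = true) :
    ∀ (a : Int), 0 ≤ a → a < 11 →
    xs.reverse.foldl
      (fun a ch =>
        let i := altFind ch
        PySem.Int.mod (2 * a + max 0 (i + PySem.Int.floordiv (i - 1) 10)) 11) a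
    = PySem.Int.mod (a * 2 ^ xs.length + wsum xs) 11 := by
  induction xs with
  | nil =>
    intro a h0 h1
    simp [wsum]
    omega
  | cons x xs ih =>
    intro a h0 h1
    simp only [List.all_cons, Bool.and_eq_true] at h
    simp only [List.reverse_cons, List.foldl_append, List.foldl_cons, List.foldl_nil]
    rw [ih h.2 a h0 h1]
    have hv : max 0 (altFind x + PySem.Int.floordiv (altFind x - 1) 10) = isoValues.getD x 0 := by
      rw [val_eq x h.1]; rfl
    rw [hv]
    simp only [PySem.Int.mod_eq_emod_of_pos (by norm_num : (0:Int) < 11), wsum]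
    set X : Int := a * 2 ^ xs.length + wsum xs with hX
    have hR : a * 2 ^ (x :: xs).length + (isoValues.getD x 0 + 2 * wsum xs)
        = 2 * X + isoValues.getD x 0 := by
      rw [hX, List.length_cons, pow_succ]; ring
    rw [hR]
    omega
-- ===== VERDICT =====
theorem iso6346_check_digit_py_spec : Claim_equal_iso6346_check_digit_py := by
  intro s hDom _
  unfold Spec_iso6346_check_digit_py iso6346_check_digit_py iso6346_check_digit_py_alt
  have hall : (PySem.List.slice s.toList none (some 10)).all pvDomChar = true := by
    have hsl : PySem.List.slice s.toList none (some 10) = s.toList.take 10 := by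
      simpa using PySem.List.slice_to_natCast (xs := s.toList) (b := 10)
    rw [hsl]
    unfold Dom_iso6346_check_digit_py pvDomStr at hDom
    exact List.all_eq_true.mpr fun c hc =>
      List.all_eq_true.mp hDom c (List.mem_of_mem_take hc)
  have hA := totalA_eq (PySem.List.slice s.toList none (some 10)) 0 0
  have hB := hornerB_eq (PySem.List.slice s.toList none (some 10)) hall 0 (le_refl 0) (by norm_num)
  simp only [Nat.cast_zero, pow_zero, one_mul, zero_mul, zero_add] at hA hB
  simp only [hA, hB]
  exact BEq.comm ..
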